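-- pv_equiv track=rewrite | github.com/warriorframework/warriorframework | warrior/Framework/ClassUtils/testdata_class.py | _validate_cmd_loc_list
-- ===== SOURCE A (Python) =====
-- def _validate_cmd_loc_list(cmd_loc_list):
--     """
--     Validate cmd_loc_list.
--     Returns False(bool) when
--         1. length of cmd_loc_list is less than 2
--         2. first element of cmd_loc_list is not zero
--         3. cmd_loc_list values are not in ascending order
--         4. cmd_loc_list has duplicate value(s)
--     else return True(bool)
--     """
--     status = True
--     if isinstance(cmd_loc_list, list):
--         if len(cmd_loc_list) < 2 or cmd_loc_list[0] != 0:
--             status = False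
--         else:
--             for i in range(len(cmd_loc_list)-1):
--                 if cmd_loc_list[i] > cmd_loc_list[i+1]:
--                     status = False
--     else:
--         status = False
--     return status
-- ===== SOURCE B (Python) =====
-- def _validate_cmd_loc_list(cmd_loc_list):
--     if not isinstance(cmd_loc_list, list):
--         return False
--     if len(cmd_loc_list) < 2 or cmd_loc_list[0] != 0:
--         return False
--     return cmd_loc_list == sorted(cmd_loc_list)
-- ===== Notes on version B (the rewrite author's own statement) =====
-- stated objective: simpler
-- what changed: Replaces the index-based adjacent-pair scan with early-return guards plus a single comparison of the list against sorted(list).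
import Mathlib
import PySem

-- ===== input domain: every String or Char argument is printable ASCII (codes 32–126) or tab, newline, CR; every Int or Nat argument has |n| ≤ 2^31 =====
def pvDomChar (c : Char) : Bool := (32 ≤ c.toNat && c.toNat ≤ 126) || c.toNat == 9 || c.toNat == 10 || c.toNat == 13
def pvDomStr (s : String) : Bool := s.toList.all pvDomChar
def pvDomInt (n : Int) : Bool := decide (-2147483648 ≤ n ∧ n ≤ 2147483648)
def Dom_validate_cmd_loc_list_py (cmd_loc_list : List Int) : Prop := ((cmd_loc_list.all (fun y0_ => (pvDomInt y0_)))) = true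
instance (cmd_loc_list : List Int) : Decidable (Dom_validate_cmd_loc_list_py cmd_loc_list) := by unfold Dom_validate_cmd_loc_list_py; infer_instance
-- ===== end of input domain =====

-- ===== PORT A =====
-- one honest line: B replaces A's adjacent-pair index scan with guards plus `list == sorted(list)` (simpler)
def validate_cmd_loc_list_py (cmd_loc_list : List Int) : Bool :=
  -- status = True; guards; for i in range(len-1): if l[i] > l[i+1]: status = False
  if cmd_loc_list.length < 2 ∨ PySem.List.pyGetD cmd_loc_list 0 0 ≠ 0 then
    false
  else
    (PySem.List.pyRange 0 ((cmd_loc_list.length : Int) - 1) 1).foldl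
      (fun status i =>
        if PySem.List.pyGetD cmd_loc_list i 0 > PySem.List.pyGetD cmd_loc_list (i + 1) 0 then
          false
        else status)
      true

-- ===== PORT B =====
def validate_cmd_loc_list_py_alt (cmd_loc_list : List Int) : Bool :=
  if cmd_loc_list.length < 2 ∨ PySem.List.pyGetD cmd_loc_list 0 0 ≠ 0 then
    false
  else
    decide (cmd_loc_list = PySem.List.sorted cmd_loc_list (fun x => x) false)

-- ===== PRECONDITION & SPEC =====
def Spec_validate_cmd_loc_list_py (cmd_loc_list : List Int) (out : Bool) : Prop := out = validate_cmd_loc_list_py_alt cmd_loc_list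
instance (cmd_loc_list : List Int) (out : Bool) : Decidable (Spec_validate_cmd_loc_list_py cmd_loc_list out) := by unfold Spec_validate_cmd_loc_list_py; infer_instance

-- ===== CLAIM (what is proved, stated in full; the proofs are below) =====
def Claim_equal_validate_cmd_loc_list_py : Prop := ∀ (cmd_loc_list : List Int), Dom_validate_cmd_loc_list_py cmd_loc_list → Spec_validate_cmd_loc_list_py cmd_loc_list (validate_cmd_loc_list_py cmd_loc_list)

-- ===== LEMMAS AND PROOFS =====

-- A's loop: fold of "if p i then false else st" is "st && (no i in the range satisfies p)"
theorem foldl_if_false (r : List Int) (p : Int → Prop) [DecidablePred p] (b : Bool) :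
    r.foldl (fun st i => if p i then false else st) b
      = (b && decide (∀ i ∈ r, ¬ p i)) := by
  induction r generalizing b with
  | nil => simp
  | cons x xs ih =>
    rw [List.foldl_cons, ih]
    by_cases hx : p x <;> simp [hx]

-- the range-indexed adjacent scan is exactly Pairwise (· ≤ ·)
theorem scan_iff (l : List Int) :
    (∀ i ∈ PySem.List.pyRange 0 ((l.length : Int) - 1) 1,
        ¬ (PySem.List.pyGetD l i 0 > PySem.List.pyGetD l (i + 1) 0))
      ↔ List.Pairwise (· ≤ ·) l := by
  rw [← List.isChain_iff_pairwise, List.isChain_iff_getElem]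
  constructor
  · intro h i hi
    have hm : (i : Int) ∈ PySem.List.pyRange 0 ((l.length : Int) - 1) 1 := by
      rw [PySem.List.mem_pyRange_one]
      constructor
      · omega
      · omega
    have := h (i : Int) hm
    rw [PySem.List.pyGetD_eq_getElem l 0 (by omega) (by omega),
        PySem.List.pyGetD_eq_getElem l 0 (by omega) (by omega)] at this
    simp only [gt_iff_lt, not_lt] at this
    simpa [Int.toNat_natCast] using this
  · intro h i hi
    rw [PySem.List.mem_pyRange_one] at hi
    rw [PySem.List.pyGetD_eq_getElem l 0 (by omega) (by omega),
        PySem.List.pyGetD_eq_getElem l 0 (by omega) (by omega)]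
    have := h i.toNat (by omega)
    simp only [gt_iff_lt, not_lt]
    have he : (i + 1).toNat = i.toNat + 1 := by omega
    simp only [he]
    exact this

-- B's comparison: list == sorted(list) iff the list is non-decreasing
theorem sorted_eq_iff_pairwise (l : List Int) :
    (l = PySem.List.sorted l (fun x => x) false) ↔ List.Pairwise (· ≤ ·) l := by
  constructor
  · intro h
    have hp := PySem.List.sorted_pairwise l (fun x => x) (κ := Int)
    rw [← h] at hp
    simpa using hp
  · intro h
    exact (PySem.List.sorted_eq_self_of_pairwise l (fun x => x) (by simpa using h)).symm

-- ===== VERDICT (by name: the statement is the Claim_ definition above) =====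
theorem validate_cmd_loc_list_py_spec : Claim_equal_validate_cmd_loc_list_py := by
  intro l _
  unfold Spec_validate_cmd_loc_list_py validate_cmd_loc_list_py validate_cmd_loc_list_py_alt
  by_cases hg : l.length < 2 ∨ PySem.List.pyGetD l 0 0 ≠ 0
  · rw [if_pos hg, if_pos hg]
  · rw [if_neg hg, if_neg hg,
        foldl_if_false _ (fun i => PySem.List.pyGetD l i 0 > PySem.List.pyGetD l (i + 1) 0) true,
        Bool.true_and, decide_eq_decide]
    rw [scan_iff]
    exact (sorted_eq_iff_pairwise l).symm
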